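-- pv_equiv track=rewrite | github.com/itstharun/CN-Assignment-1 | A05/udpchecksum.py | dcs
-- ===== SOURCE A (Python) =====
-- def dcs(a):# method to obtain the checksum for the given data
--     s=[] #to store 16bit hexadecial from the data
--     j=0  #index variable
--     for i in range(0,len(a)-1,2):
--         s.insert(j,format(ord(a[i]),'02x')+format(ord(a[i+1]),'02x')) #concatenates hexa of 2 consecutive characters
--         j=j+1 #updating index
--     if((len(a)%2)==1): #padding zeros to obtain 16bit integers
--         s.insert(j,format(ord(a[len(a)-1]),'02x')+format(0,'02x'))
--         j=j+1
--     sum=0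
--     for i in range(j):
--         sum=sum+(int(s[i],16))  #adding the hexa values
--     return format(sum,'02x')  #return checksum of the data
-- ===== SOURCE B (Python) =====
-- def dcs(a):  # simpler: one arithmetic pass over parity slices; no hex-string table
--     total = 256 * sum(ord(c) for c in a[::2]) + sum(ord(c) for c in a[1::2])
--     return format(total, '02x')
-- ===== Notes on version B (the rewrite author's own statement) =====
-- stated objective: simpler
-- what changed: Replaced the build-hex-string-table-then-reparse two-pass structure with a single arithmetic expression: 256 times the sum of ords at even positions plus the sum of ords at odd positions, over parity slices.
import Mathlib
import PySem

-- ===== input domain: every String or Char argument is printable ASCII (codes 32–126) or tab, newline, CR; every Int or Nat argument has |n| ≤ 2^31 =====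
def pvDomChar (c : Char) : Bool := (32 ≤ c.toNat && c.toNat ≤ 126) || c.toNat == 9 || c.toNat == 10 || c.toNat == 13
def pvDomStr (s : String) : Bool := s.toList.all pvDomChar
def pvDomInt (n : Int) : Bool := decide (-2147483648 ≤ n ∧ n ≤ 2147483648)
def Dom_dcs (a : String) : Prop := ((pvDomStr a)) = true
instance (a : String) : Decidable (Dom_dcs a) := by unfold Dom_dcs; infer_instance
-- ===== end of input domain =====

-- B replaces A's build-hex-table-then-reparse passes by one arithmetic expression over parity slices (objective: simpler).

-- ===== PORT A =====
-- shared hand ports of Python hex built-ins (PySem has no base-16 helpers):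
-- hexDig n = the n-th lowercase hex digit (exact for n < 16)
def hexDig (n : Nat) : Char := if n < 10 then Char.ofNat (48 + n) else Char.ofNat (87 + n)

-- toHexChars n = the digits of format(n, 'x') (exact for n ≥ 0)
def toHexChars (n : Nat) : List Char :=
  if _h : n < 16 then [hexDig n]
  else toHexChars (n / 16) ++ [hexDig (n % 16)]
  decreasing_by exact Nat.div_lt_self (by omega) (by norm_num)

-- chars02 n = the characters of format(n, '02x'): hex digits zero-padded to width ≥ 2 (exact for n ≥ 0)
def chars02 (n : Nat) : List Char :=
  List.replicate (2 - (toHexChars n).length) '0' ++ toHexChars n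

-- hexVal c = the value of one hex digit character (exact on [0-9a-fA-F])
def hexVal (c : Char) : Nat :=
  if 97 ≤ c.toNat then c.toNat - 87 else if 65 ≤ c.toNat then c.toNat - 55 else c.toNat - 48

-- parseHex cs = int(String.mk cs, 16) (exact on nonempty strings of hex digits, which is all A feeds it)
def parseHex (cs : List Char) : Nat := cs.foldl (fun acc c => 16 * acc + hexVal c) 0

-- literal transliteration of A: build the list s of 4-hex-digit strings with running index j,
-- pad an odd tail, then re-parse and sum; all Python ints here are nonnegative, carried as Nat.
def dcs (a : String) : String :=
  let l := a.toList
  let sj : List (List Char) × Nat :=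
    (PySem.List.pyRange 0 ((l.length : Int) - 1) 2).foldl
      (fun sj i =>
        (PySem.List.insert sj.1 (sj.2 : Int)
          (chars02 (PySem.List.pyGetD l i ' ').toNat ++
           chars02 (PySem.List.pyGetD l (i + 1) ' ').toNat), sj.2 + 1))
      ([], 0)
  let sj : List (List Char) × Nat :=
    if l.length % 2 == 1 then
      (PySem.List.insert sj.1 (sj.2 : Int)
        (chars02 (PySem.List.pyGetD l ((l.length : Int) - 1) ' ').toNat ++ chars02 0), sj.2 + 1)
    else sj
  let sum : Nat :=
    (PySem.List.pyRange 0 (sj.2 : Int) 1).foldl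
      (fun acc i => acc + parseHex (PySem.List.pyGetD sj.1 i [])) 0
  String.mk (chars02 sum)

-- ===== PORT B =====
-- literal transliteration of B: a[::2] and a[1::2] via PySem's stepped slice on the char list,
-- then 256 * (sum of even-position ords) + (sum of odd-position ords), formatted as '02x'.
def dcs_alt (a : String) : String :=
  let l := a.toList
  let evens := (PySem.List.slice? l none none 2).getD []
  let odds := (PySem.List.slice? l (some 1) none 2).getD []
  String.mk (chars02 (256 * (evens.map Char.toNat).sum + (odds.map Char.toNat).sum))

-- ===== PRECONDITION & SPEC =====
def Spec_dcs (a : String) (out : String) : Prop := out = dcs_alt a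
instance (a : String) (out : String) : Decidable (Spec_dcs a out) := by unfold Spec_dcs; infer_instance

-- ===== CLAIM (what is proved, stated in full; the proofs are below) =====
def Claim_equal_dcs : Prop := ∀ (a : String), Dom_dcs a → Spec_dcs a (dcs a)


-- ===== LEMMAS AND PROOFS =====

-- Python list.insert at index = length appends
theorem pv_insert_at_length {α : Type} (xs : List α) (x : α) :
    PySem.List.insert xs (xs.length : Int) x = xs ++ [x] := by
  simp [PySem.List.insert, PySem.List.sliceIndices]
  rw [if_neg (by omega)]
  simp

-- A's first loop: inserting at the running index j (= current length) appends, so the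
-- state fold is a map over the index list
theorem pv_foldl_insert_append {α β : Type} (g : β → α) (is : List β) (s : List α) :
    is.foldl (fun (sj : List α × Nat) i => (PySem.List.insert sj.1 (sj.2 : Int) (g i), sj.2 + 1)) (s, s.length)
      = (s ++ is.map g, s.length + is.length) := by
  induction is generalizing s with
  | nil => simp
  | cons i t ih =>
      rw [List.foldl_cons]
      have h1 : (PySem.List.insert s (s.length : Int) (g i), s.length + 1)
          = ((s ++ [g i]), (s ++ [g i]).length) := by
        rw [pv_insert_at_length]; simp
      rw [h1, ih]
      simp [List.append_assoc]
      omega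

theorem pv_foldA {α β : Type} (g : β → α) (is : List β) :
    is.foldl (fun (sj : List α × Nat) i => (PySem.List.insert sj.1 (sj.2 : Int) (g i), sj.2 + 1)) ([], 0)
      = (is.map g, is.length) := by
  simpa using pv_foldl_insert_append g is []

-- range(0, n-1, 2) enumerates the pair starts
theorem pv_rangeA (n : Nat) :
    PySem.List.pyRange 0 ((n : Int) - 1) 2 = (List.range (n / 2)).map (fun k : Nat => 2 * (k : Int)) := by
  rw [PySem.List.pyRange_of_pos _ _ (by norm_num)]
  have hc : (if (0:Int) < (n : Int) - 1 then (((n : Int) - 1 - 0 + 2 - 1) / 2).toNat else 0) = n / 2 := by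
    rcases Nat.lt_or_ge n 2 with h | h
    · interval_cases n <;> decide
    · rw [if_pos (by omega)]
      omega
  rw [hc]
  simp

theorem pv_foldl_add_nat {α : Type} (xs : List α) (g : α → Nat) (a : Nat) :
    xs.foldl (fun acc x => acc + g x) a = a + (xs.map g).sum := by
  induction xs generalizing a with
  | nil => simp
  | cons y t ih => simp [List.foldl_cons, ih]; omega

theorem pv_sum_map_range {M : Type} [AddCommMonoid M] (m : Nat) (f : Nat → M) :
    ((List.range m).map f).sum = ∑ k ∈ Finset.range m, f k := by
  induction m with
  | zero => simp
  | succ m ih => rw [List.range_succ, Finset.sum_range_succ]; simp [ih]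

theorem pv_filterMap_some_range {α : Type} (m : Nat) (f : Nat → Option α) (g : Nat → α)
    (h : ∀ k < m, f k = some (g k)) :
    (List.range m).filterMap f = (List.range m).map g := by
  induction m with
  | zero => simp
  | succ m ih =>
      rw [List.range_succ, List.filterMap_append, List.map_append,
        ih (fun k hk => h k (by omega))]
      simp [h m (by omega)]

theorem pv_hexVal_hexDig (k : Nat) (h : k < 16) : hexVal (hexDig k) = k := by
  interval_cases k <;> decide

theorem pv_toHexChars_lt16 (x : Nat) (h : x < 16) : toHexChars x = [hexDig x] := by
  rw [toHexChars]; simp [h]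

theorem pv_chars02_lt256 (x : Nat) (h : x < 256) :
    chars02 x = [hexDig (x / 16), hexDig (x % 16)] := by
  unfold chars02
  rcases Nat.lt_or_ge x 16 with h16 | h16
  · rw [pv_toHexChars_lt16 x h16]
    have h0 : x / 16 = 0 := by omega
    have h1 : x % 16 = x := by omega
    rw [h0, h1]
    simp [hexDig]
  · rw [toHexChars, dif_neg (by omega), pv_toHexChars_lt16 (x / 16) (by omega)]
    simp

-- int(format(x,'02x') + format(y,'02x'), 16) = 256*x + y
theorem pv_parse_pair (x y : Nat) (hx : x < 256) (hy : y < 256) :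
    parseHex (chars02 x ++ chars02 y) = 256 * x + y := by
  rw [pv_chars02_lt256 x hx, pv_chars02_lt256 y hy]
  simp only [parseHex, List.cons_append, List.nil_append, List.foldl_cons, List.foldl_nil]
  rw [pv_hexVal_hexDig (x / 16) (by omega), pv_hexVal_hexDig (x % 16) (by omega),
      pv_hexVal_hexDig (y / 16) (by omega), pv_hexVal_hexDig (y % 16) (by omega)]
  omega

-- B's slices as index maps
theorem pv_evens_eq (l : List Char) :
    (PySem.List.slice? l none none 2).getD []
      = (List.range ((l.length + 1) / 2)).map (fun k => l.getD (2 * k) ' ') := by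
  simp only [PySem.List.slice?, PySem.List.sliceIndices]
  norm_num
  have hm : (if 0 < l.length then (((l.length : Int) + 2 - 1) / 2).toNat else 0) = (l.length + 1) / 2 := by
    split_ifs <;> omega
  rw [hm]
  apply pv_filterMap_some_range
  intro k hk
  have hidx : (2 * (k : Int)).toNat = 2 * k := by omega
  rw [hidx]
  have hlt : 2 * k < l.length := by omega
  rw [List.getElem?_eq_getElem hlt]
  simp

theorem pv_odds_eq (l : List Char) :
    (PySem.List.slice? l (some 1) none 2).getD []
      = (List.range (l.length / 2)).map (fun k => l.getD (2 * k + 1) ' ') := by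
  rcases Nat.eq_zero_or_pos l.length with h0 | h0
  · rw [List.eq_nil_of_length_eq_zero h0]; rfl
  · simp only [PySem.List.slice?, PySem.List.sliceIndices]
    norm_num
    have hmin : min (1 : Int) (l.length : Int) = 1 := by omega
    rw [hmin]
    have hm : (if 1 < l.length then (((l.length : Int) - 1 + 2 - 1) / 2).toNat else 0) = l.length / 2 := by
      split_ifs <;> omega
    rw [hm]
    apply pv_filterMap_some_range
    intro k hk
    have hidx : ((1 : Int) + 2 * (k : Int)).toNat = 2 * k + 1 := by omega
    rw [hidx]
    have hlt : 2 * k + 1 < l.length := by omega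
    rw [List.getElem?_eq_getElem hlt]
    simp

-- the pairwise sum with odd padding equals the parity-split sum
theorem pv_arith (n : Nat) (f : Nat → Nat) :
    (∑ k ∈ Finset.range (n / 2), (256 * f (2 * k) + f (2 * k + 1)))
        + (if n % 2 = 1 then 256 * f (n - 1) else 0)
      = 256 * (∑ k ∈ Finset.range ((n + 1) / 2), f (2 * k))
          + ∑ k ∈ Finset.range (n / 2), f (2 * k + 1) := by
  by_cases h : n % 2 = 1
  · rw [if_pos h, show (n + 1) / 2 = n / 2 + 1 by omega, Finset.sum_range_succ,
      show 2 * (n / 2) = n - 1 by omega, Finset.sum_add_distrib, ← Finset.mul_sum]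
    ring
  · rw [if_neg h, show (n + 1) / 2 = n / 2 by omega, Finset.sum_add_distrib, ← Finset.mul_sum]
    ring


theorem pv_insert_at {α : Type} (xs : List α) (m : Nat) (h : xs.length = m) (x : α) :
    PySem.List.insert xs (m : Int) x = xs ++ [x] := by
  subst h; exact pv_insert_at_length xs x

theorem pv_sum_eval (s : List (List Char)) (j : Nat) (h : s.length = j) :
    List.foldl (fun acc i => acc + parseHex (PySem.List.pyGetD s i [])) 0
        (PySem.List.pyRange 0 (j : Int))
      = (s.map parseHex).sum := by
  subst h
  rw [PySem.List.foldl_pyRange_zero_pyGetD' s [] (fun acc blk => acc + parseHex blk) 0]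
  rw [pv_foldl_add_nat]
  omega

theorem pv_get2 (l : List Char) (k : Nat) :
    PySem.List.pyGetD l (2 * (k : Int)) ' ' = l.getD (2 * k) ' ' := by
  rw [show (2 * (k : Int)) = ((2 * k : Nat) : Int) by push_cast; ring, PySem.List.pyGetD_natCast]

theorem pv_get21 (l : List Char) (k : Nat) :
    PySem.List.pyGetD l (2 * (k : Int) + 1) ' ' = l.getD (2 * k + 1) ' ' := by
  rw [show (2 * (k : Int) + 1) = ((2 * k + 1 : Nat) : Int) by push_cast; ring, PySem.List.pyGetD_natCast]

theorem pv_getD_lt (l : List Char) (h : ∀ c ∈ l, c.toNat < 256) (k : Nat) :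
    (l.getD k ' ').toNat < 256 := by
  rcases Nat.lt_or_ge k l.length with hk | hk
  · rw [List.getD_eq_getElem l ' ' hk]
    exact h _ (List.getElem_mem hk)
  · rw [List.getD_eq_default l ' ' hk]
    decide

-- ===== VERDICT (by name: the statement is the Claim_ definition above) =====
theorem dcs_spec : Claim_equal_dcs := by
  intro a hDom
  have hlt : ∀ c ∈ a.toList, c.toNat < 256 := by
    intro c hc
    have h := List.all_eq_true.mp hDom c hc
    simp [pvDomChar] at h
    omega
  show dcs a = dcs_alt a
  unfold dcs dcs_alt
  simp only [pv_rangeA a.toList.length, List.foldl_map, pv_foldA, pv_evens_eq, pv_odds_eq,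
    List.map_map, List.length_range, pv_get2, pv_get21]
  set l := a.toList with hl
  set n := l.length with hn
  congr 2
  by_cases hpar : n % 2 = 1
  · simp only [hpar, beq_self_eq_true, if_pos]
    rw [pv_insert_at _ (n / 2) (by simp) _,
        pv_sum_eval _ (n / 2 + 1) (by simp),
        List.map_append, List.sum_append, List.map_map]
    simp only [List.map_cons, List.map_nil, List.sum_cons, List.sum_nil]
    have hlast : PySem.List.pyGetD l ((n : Int) - 1) ' ' = l.getD (n - 1) ' ' := by
      rw [show ((n : Int) - 1) = ((n - 1 : Nat) : Int) by omega, PySem.List.pyGetD_natCast]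
    rw [hlast, pv_parse_pair _ 0 (pv_getD_lt l hlt _) (by norm_num)]
    simp only [pv_sum_map_range, Function.comp_apply]
    rw [Finset.sum_congr rfl (fun k _ =>
      pv_parse_pair _ _ (pv_getD_lt l hlt _) (pv_getD_lt l hlt _))]
    have harith := pv_arith n (fun j => (l.getD j ' ').toNat)
    rw [if_pos hpar] at harith
    linarith [harith]
  · rw [if_neg (by simpa using hpar)]
    rw [pv_sum_eval _ (n / 2) (by simp), List.map_map]
    simp only [pv_sum_map_range, Function.comp_apply]
    rw [Finset.sum_congr rfl (fun k _ =>
      pv_parse_pair _ _ (pv_getD_lt l hlt _) (pv_getD_lt l hlt _))]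
    have harith := pv_arith n (fun j => (l.getD j ' ').toNat)
    rw [if_neg hpar] at harith
    linarith [harith]
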